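-- pv_equiv track=rewrite | github.com/nbri15/Tracker-V2 | app/services/assessments.py | previous_term
-- ===== SOURCE A (Python) =====
-- TERMS = [
--     ('autumn', 'Autumn'),
--     ('spring', 'Spring'),
--     ('summer', 'Summer'),
-- ]
--
-- def previous_term(term: str) -> str | None:
--     order = [key for key, _ in TERMS]
--     if term not in order:
--         return None
--     idx = order.index(term)
--     if idx <= 0:
--         return None
--     return order[idx - 1]
-- ===== SOURCE B (Python) =====
-- TERMS = [
--     ('autumn', 'Autumn'),
--     ('spring', 'Spring'),
--     ('summer', 'Summer'),
-- ]
--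
-- def previous_term(term: str) -> str | None:
--     def walk(prev, rest):
--         if not rest:
--             return None
--         key = rest[0][0]
--         if key == term:
--             return prev
--         return walk(key, rest[1:])
--     return walk(None, TERMS)
-- ===== Notes on version B (the rewrite author's own statement) =====
-- stated objective: alternative
-- what changed: Replaced A's staged pipeline (build key list, membership test, .index scan, idx<=0 guard, indexed access) with one recursive pass over TERMS that carries the previous key as an accumulator and returns it when the sought key is reached.
import Mathlib
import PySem

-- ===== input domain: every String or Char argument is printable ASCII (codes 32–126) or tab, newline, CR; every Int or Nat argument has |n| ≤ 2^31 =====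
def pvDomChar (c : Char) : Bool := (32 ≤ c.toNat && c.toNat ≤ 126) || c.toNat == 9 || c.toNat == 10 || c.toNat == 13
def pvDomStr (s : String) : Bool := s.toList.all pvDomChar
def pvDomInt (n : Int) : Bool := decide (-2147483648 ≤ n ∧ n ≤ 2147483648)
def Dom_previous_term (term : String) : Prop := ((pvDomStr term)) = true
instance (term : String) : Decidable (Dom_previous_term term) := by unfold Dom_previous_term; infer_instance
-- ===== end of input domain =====

-- B replaces A's staged list/membership/index/guard pipeline with one recursive pass carrying the previous key as an accumulator.

-- ===== PORT A =====
def pvTERMS : List (String × String) := [("autumn", "Autumn"), ("spring", "Spring"), ("summer", "Summer")]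

def previous_term (term : String) : Option String :=
  let order := pvTERMS.map (fun p => p.1)
  if ¬ (order.contains term) then none
  else
    match PySem.List.index? order term with
    | none => none
    | some idx => if idx ≤ 0 then none else PySem.List.pyGet? order (idx - 1)

-- ===== PORT B =====
def pvWalk (term : String) (prev : Option String) : List (String × String) → Option String
  | [] => none
  | p :: rest => if p.1 = term then prev else pvWalk term (some p.1) rest

def previous_term_alt (term : String) : Option String :=
  pvWalk term none pvTERMS

-- ===== PRECONDITION & SPEC =====
def Spec_previous_term (term : String) (out : Option String) : Prop := out = previous_term_alt term
instance (term : String) (out : Option String) : Decidable (Spec_previous_term term out) := by unfold Spec_previous_term; infer_instance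

-- ===== CLAIM (what is proved, stated in full; the proofs are below) =====
def Claim_equal_previous_term : Prop := ∀ (term : String), Dom_previous_term term → Spec_previous_term term (previous_term term)

-- ===== LEMMAS AND PROOFS =====

-- ===== VERDICT (by name: the statement is the Claim_ definition above) =====
theorem previous_term_spec : Claim_equal_previous_term := by
  intro term _
  unfold Spec_previous_term previous_term previous_term_alt
  by_cases h1 : term = "autumn"
  · subst h1; decide
  by_cases h2 : term = "spring"
  · subst h2; decide
  by_cases h3 : term = "summer"
  · subst h3; decide
  simp [pvTERMS, pvWalk, h1, h2, h3]
  intro _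
  rw [if_neg (fun h => h2 h.symm), if_neg (fun h => h3 h.symm)]
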